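-- pv_equiv track=rewrite | github.com/AntonioRUguina/KPGDP | src/mmdp_packing.py | evalSolution
-- ===== SOURCE A (Python) =====
-- def evalSolution(inst, sol):
--     minDist = 0x3f3f3f
--     n = len(sol)
--     for i in range(n):
--         ii, it = sol[i] # Extract the first pair (i, t1)
--         for j in range(i+1, n):
--             jj, jt = sol[j]  # Extract the second pair (j, t2)
--             if it == jt:
--                 minDist = min(minDist, inst['d'][ii][jj])
--     return minDist
-- ===== SOURCE B (Python) =====
-- def evalSolution(inst, sol):
--     minDist = 0x3f3f3f
--     seen = {}  # type -> list of indices seen so far, in sol order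
--     for ii, it in sol:
--         bucket = seen.setdefault(it, [])
--         for prev in bucket:
--             minDist = min(minDist, inst['d'][prev][ii])
--         bucket.append(ii)
--     return minDist
-- ===== Notes on version B (the rewrite author's own statement) =====
-- stated objective: alternative
-- what changed: Replaced the all-pairs double index loop that branches on type equality with a single left-to-right pass that keeps a dictionary of already-seen element indices per type and compares each element only against the earlier same-type ones.
import Mathlib
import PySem

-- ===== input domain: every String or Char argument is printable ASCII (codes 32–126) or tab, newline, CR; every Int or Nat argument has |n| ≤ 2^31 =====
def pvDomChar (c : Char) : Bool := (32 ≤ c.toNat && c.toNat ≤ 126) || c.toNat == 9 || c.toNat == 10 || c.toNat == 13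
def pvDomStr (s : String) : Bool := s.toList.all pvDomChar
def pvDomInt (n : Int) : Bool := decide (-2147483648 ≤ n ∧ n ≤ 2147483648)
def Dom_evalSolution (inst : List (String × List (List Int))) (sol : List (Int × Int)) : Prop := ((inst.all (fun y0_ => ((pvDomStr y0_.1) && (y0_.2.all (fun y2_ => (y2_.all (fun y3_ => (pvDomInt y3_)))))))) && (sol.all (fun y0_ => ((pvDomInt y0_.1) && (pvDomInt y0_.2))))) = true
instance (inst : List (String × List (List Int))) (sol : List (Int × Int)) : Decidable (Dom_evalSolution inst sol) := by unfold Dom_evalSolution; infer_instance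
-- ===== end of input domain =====

-- B replaces A's all-pairs double scan (branching on type equality) by one pass that
-- groups the indices per type in a dictionary and compares each element only with the
-- earlier same-type ones ('alternative': same worst-case cost, no cross-type pair visits).

-- shared accessor helpers: inst['d'] (dict = assoc list, first match) and inst['d'][x][y]
def instD (inst : List (String × List (List Int))) : List (List Int) :=
  (PySem.Dict.mk inst).getD "d" []

def dvv (inst : List (String × List (List Int))) (x y : Int) : Int :=
  PySem.List.pyGetD (PySem.List.pyGetD (instD inst) x []) y 0

-- ===== PORT A =====
def evalSolution (inst : List (String × List (List Int))) (sol : List (Int × Int)) : Int :=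
  let n : Int := sol.length
  (PySem.List.pyRange 0 n 1).foldl (fun minDist i =>
    -- ii = sol[i].1, it = sol[i].2 ; jj = sol[j].1, jt = sol[j].2 (destructuring inlined)
    (PySem.List.pyRange (i + 1) n 1).foldl (fun md j =>
      if (PySem.List.pyGetD sol i (0, 0)).2 = (PySem.List.pyGetD sol j (0, 0)).2 then
        min md (dvv inst (PySem.List.pyGetD sol i (0, 0)).1 (PySem.List.pyGetD sol j (0, 0)).1)
      else md) minDist)
    0x3f3f3f

-- ===== PORT B =====
def evalSolution_alt (inst : List (String × List (List Int))) (sol : List (Int × Int)) : Int :=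
  (sol.foldl (fun st p =>
      ((st.2.getD p.2 []).foldl (fun m prev => min m (dvv inst prev p.1)) st.1,  -- bucket = seen.setdefault(it, [])
       st.2.modify p.2 [] (· ++ [p.1])))                                         -- bucket.append(ii)
    ((0x3f3f3f : Int), (PySem.Dict.empty : PySem.Dict Int (List Int)))).1

-- ===== PRECONDITION & SPEC =====
-- Pre_ excludes exactly the inputs where the Python raises: some same-type pair (i, j) exists
-- and key 'd' is missing (KeyError) or one of the two indices is out of range (IndexError).
def Pre_evalSolution (inst : List (String × List (List Int))) (sol : List (Int × Int)) : Prop :=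
  ∀ i, i < sol.length → ∀ j, j < sol.length → i < j →
    (sol.getD i (0, 0)).2 = (sol.getD j (0, 0)).2 →
    (PySem.Dict.mk inst).contains "d" = true ∧
    (-((instD inst).length : Int) ≤ (sol.getD i (0, 0)).1 ∧ (sol.getD i (0, 0)).1 < ((instD inst).length : Int)) ∧
    (-((PySem.List.pyGetD (instD inst) (sol.getD i (0, 0)).1 []).length : Int) ≤ (sol.getD j (0, 0)).1 ∧
      (sol.getD j (0, 0)).1 < ((PySem.List.pyGetD (instD inst) (sol.getD i (0, 0)).1 []).length : Int))

set_option maxHeartbeats 1000000 in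
instance (inst : List (String × List (List Int))) (sol : List (Int × Int)) : Decidable (Pre_evalSolution inst sol) := by
  unfold Pre_evalSolution
  apply Nat.decidableBallLT

def pvWitness_evalSolution : (List (String × List (List Int))) × (List (Int × Int)) :=
  ([("d", [[0, 5], [7, 0]])], [(0, 0), (1, 0)])

def Spec_evalSolution (inst : List (String × List (List Int))) (sol : List (Int × Int)) (out : Int) : Prop := out = evalSolution_alt inst sol
instance (inst : List (String × List (List Int))) (sol : List (Int × Int)) (out : Int) : Decidable (Spec_evalSolution inst sol out) := by unfold Spec_evalSolution; infer_instance

-- ===== CLAIM (what is proved, stated in full; the proofs are below) =====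
def Claim_equal_evalSolution : Prop := ∀ (inst : List (String × List (List Int))) (sol : List (Int × Int)), Dom_evalSolution inst sol → Pre_evalSolution inst sol → Spec_evalSolution inst sol (evalSolution inst sol)

-- ===== LEMMAS AND PROOFS =====

-- A's pair values in A's order: each element against all LATER same-type elements
def pairsF (inst : List (String × List (List Int))) : List (Int × Int) → List Int
  | [] => []
  | x :: r => ((r.filter (fun y => x.2 == y.2)).map (fun y => dvv inst x.1 y.1)) ++ pairsF inst r

-- B's pair values in B's order: each element against all EARLIER same-type elements
def pairsB (inst : List (String × List (List Int))) (acc : List (Int × Int)) : List (Int × Int) → List Int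
  | [] => []
  | y :: r => ((acc.filter (fun x => x.2 == y.2)).map (fun x => dvv inst x.1 y.1)) ++ pairsB inst (acc ++ [y]) r

def crossL (inst : List (String × List (List Int))) (acc l : List (Int × Int)) : List Int :=
  acc.flatMap (fun x => (l.filter (fun y => x.2 == y.2)).map (fun y => dvv inst x.1 y.1))

-- ---- A-side characterisation ----

theorem innerA_eq (inst : List (String × List (List Int))) (x : Int × Int) :
    ∀ (r : List (Int × Int)) (m : Int),
      r.foldl (fun md q => if x.2 = q.2 then min md (dvv inst x.1 q.1) else md) m
        = ((r.filter (fun y => x.2 == y.2)).map (fun y => dvv inst x.1 y.1)).foldl min m := by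
  intro r
  induction r with
  | nil => intro m; rfl
  | cons y r ih =>
    intro m
    simp only [List.foldl_cons, List.filter_cons]
    by_cases h : (x.2 == y.2) = true
    · rw [if_pos (beq_iff_eq.mp h), if_pos h]
      simp only [List.map_cons, List.foldl_cons]
      exact ih _
    · rw [if_neg (by simpa using h), if_neg h]
      exact ih _

theorem outerA_eq (inst : List (String × List (List Int))) (sol : List (Int × Int)) :
    ∀ (post pre : List (Int × Int)), sol = pre ++ post → ∀ (m : Int),
      (PySem.List.pyRange (pre.length : Int) (sol.length : Int) 1).foldl (fun minDist i =>
        (PySem.List.pyRange (i + 1) (sol.length : Int) 1).foldl (fun md j =>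
          if (PySem.List.pyGetD sol i (0, 0)).2 = (PySem.List.pyGetD sol j (0, 0)).2 then
            min md (dvv inst (PySem.List.pyGetD sol i (0, 0)).1 (PySem.List.pyGetD sol j (0, 0)).1)
          else md) minDist) m
      = (pairsF inst post).foldl min m := by
  intro post
  induction post with
  | nil =>
    intro pre hs m
    rw [PySem.List.pyRange_one_eq_nil (by simp [hs])]
    simp [pairsF]
  | cons x r ih =>
    intro pre hs m
    have hlen : sol.length = pre.length + (r.length + 1) := by simp [hs]
    rw [PySem.List.pyRange_one_cons (by omega : (pre.length : Int) < (sol.length : Int))]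
    rw [List.foldl_cons]
    have hp : PySem.List.pyGetD sol (pre.length : Int) (0, 0) = x := by
      rw [PySem.List.pyGetD_natCast, hs]
      simp [List.getD_eq_getElem?_getD]
    -- the first outer iteration is the inner loop over the suffix r
    have hinner : ∀ (m' : Int),
        (PySem.List.pyRange ((pre.length : Int) + 1) (sol.length : Int) 1).foldl (fun md j =>
          if (PySem.List.pyGetD sol (pre.length : Int) (0, 0)).2 = (PySem.List.pyGetD sol j (0, 0)).2 then
            min md (dvv inst (PySem.List.pyGetD sol (pre.length : Int) (0, 0)).1 (PySem.List.pyGetD sol j (0, 0)).1)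
          else md) m'
        = ((r.filter (fun y => x.2 == y.2)).map (fun y => dvv inst x.1 y.1)).foldl min m' := by
      intro m'
      rw [PySem.List.foldl_pyRange_pyGetD' sol (0, 0)
        (fun md q => if (PySem.List.pyGetD sol (pre.length : Int) (0, 0)).2 = q.2 then
            min md (dvv inst (PySem.List.pyGetD sol (pre.length : Int) (0, 0)).1 q.1) else md)
        m' (by omega)]
      have hdrop : sol.drop (((pre.length : Int) + 1).toNat) = r := by
        have h1 : ((pre.length : Int) + 1).toNat = pre.length + 1 := by omega
        rw [h1, hs, show pre ++ x :: r = (pre ++ [x]) ++ r by simp,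
          show pre.length + 1 = (pre ++ [x]).length by simp]
        exact List.drop_left
      rw [hdrop, hp]
      exact innerA_eq inst x r m'
    rw [hinner m]
    have hcast : (pre.length : Int) + 1 = ((pre ++ [x]).length : Int) := by simp
    rw [hcast]
    rw [ih (pre ++ [x]) (by simp [hs]) _]
    simp [pairsF, List.foldl_append]

theorem A_eq (inst : List (String × List (List Int))) (sol : List (Int × Int)) :
    evalSolution inst sol = (pairsF inst sol).foldl min 0x3f3f3f := by
  have h := outerA_eq inst sol sol [] (by simp) 0x3f3f3f
  simpa [evalSolution] using h

-- ---- B-side characterisation ----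

def dictOf (acc : List (Int × Int)) : PySem.Dict Int (List Int) :=
  acc.foldl (fun d p => d.modify p.2 [] (· ++ [p.1])) PySem.Dict.empty

theorem bucket_eq (acc : List (Int × Int)) (t : Int) :
    (dictOf acc).getD t [] = (acc.filter (fun p => p.2 == t)).map (·.1) := by
  have hswap : dictOf acc
      = (acc.map Prod.swap).foldl (fun d q => d.modify q.1 [] (· ++ [q.2])) PySem.Dict.empty := by
    rw [List.foldl_map]; rfl
  rw [hswap, PySem.Dict.getD_foldl_modify_append]
  simp [List.filter_map, Function.comp_def, List.map_map]

theorem dictOf_snoc (acc : List (Int × Int)) (y : Int × Int) :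
    (dictOf acc).modify y.2 [] (· ++ [y.1]) = dictOf (acc ++ [y]) := by
  simp [dictOf, List.foldl_append]

theorem goB_eq (inst : List (String × List (List Int))) :
    ∀ (l acc : List (Int × Int)) (m : Int),
      (l.foldl (fun st p =>
          ((st.2.getD p.2 []).foldl (fun m prev => min m (dvv inst prev p.1)) st.1,
           st.2.modify p.2 [] (· ++ [p.1]))) (m, dictOf acc)).1
        = (pairsB inst acc l).foldl min m := by
  intro l
  induction l with
  | nil => intro acc m; rfl
  | cons y r ih =>
    intro acc m
    rw [List.foldl_cons]
    have hstep :
        ((dictOf acc).getD y.2 [] |>.foldl (fun m prev => min m (dvv inst prev y.1)) m)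
          = (((acc.filter (fun x => x.2 == y.2)).map (fun x => dvv inst x.1 y.1)).foldl min m) := by
      rw [bucket_eq]
      rw [List.foldl_map, List.foldl_map]
    rw [show ((m, dictOf acc).2 : PySem.Dict Int (List Int)) = dictOf acc from rfl]
    simp only [hstep, dictOf_snoc]
    rw [ih (acc ++ [y])]
    simp [pairsB, List.foldl_append]

theorem B_eq (inst : List (String × List (List Int))) (sol : List (Int × Int)) :
    evalSolution_alt inst sol = (pairsB inst [] sol).foldl min 0x3f3f3f := by
  have h := goB_eq inst sol [] 0x3f3f3f
  simpa [evalSolution_alt, dictOf] using h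

-- ---- the two pair lists are permutations of each other ----

theorem flatMap_ite_singleton {α β : Type} (l : List α) (p : α → Bool) (f : α → β) :
    l.flatMap (fun x => if p x then [f x] else []) = (l.filter p).map f := by
  induction l with
  | nil => rfl
  | cons a l ih => by_cases h : p a <;> simp [h, ih]

theorem flatMap_append_perm {α β : Type} (l : List α) (f g : α → List β) :
    (l.flatMap (fun x => f x ++ g x)).Perm (l.flatMap f ++ l.flatMap g) := by
  induction l with
  | nil => simp
  | cons a l ih =>
    simp only [List.flatMap_cons]
    have h1 : (g a ++ (l.flatMap f ++ l.flatMap g)).Perm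
        (l.flatMap f ++ (g a ++ l.flatMap g)) := by
      have := (List.perm_append_comm (l₁ := g a) (l₂ := l.flatMap f)).append_right (l.flatMap g)
      simpa [List.append_assoc] using this
    have h2 : ((f a ++ g a) ++ l.flatMap (fun x => f x ++ g x)).Perm
        ((f a ++ g a) ++ (l.flatMap f ++ l.flatMap g)) := ih.append_left _
    refine h2.trans ?_
    have h3 : ((f a ++ g a) ++ (l.flatMap f ++ l.flatMap g))
        = f a ++ (g a ++ (l.flatMap f ++ l.flatMap g)) := by simp [List.append_assoc]
    rw [h3]
    have h4 := h1.append_left (f a)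
    refine h4.trans ?_
    simp [List.append_assoc]

theorem pairsB_perm (inst : List (String × List (List Int))) :
    ∀ (l acc : List (Int × Int)),
      (pairsB inst acc l).Perm (crossL inst acc l ++ pairsF inst l) := by
  intro l
  induction l with
  | nil => intro acc; simp [pairsB, crossL, pairsF]
  | cons y r ih =>
    intro acc
    have h5 : crossL inst acc (y :: r)
        = acc.flatMap (fun x => (if x.2 == y.2 then [dvv inst x.1 y.1] else [])
            ++ (r.filter (fun z => x.2 == z.2)).map (fun z => dvv inst x.1 z.1)) := by
      unfold crossL
      congr 1
      funext x
      by_cases h : (x.2 == y.2) = true <;> simp [h]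
    have h6 : (crossL inst acc (y :: r)).Perm
        ((acc.filter (fun x => x.2 == y.2)).map (fun x => dvv inst x.1 y.1)
          ++ crossL inst acc r) := by
      rw [h5]
      refine (flatMap_append_perm acc _ _).trans ?_
      rw [flatMap_ite_singleton]
      exact List.Perm.refl _
    have h2 : crossL inst (acc ++ [y]) r
        = crossL inst acc r ++ crossL inst [y] r := by
      simp [crossL]
    have h3 : crossL inst [y] r
        = (r.filter (fun z => y.2 == z.2)).map (fun z => dvv inst y.1 z.1) := by
      simp [crossL]
    have key : ((acc.filter (fun x => x.2 == y.2)).map (fun x => dvv inst x.1 y.1)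
          ++ pairsB inst (acc ++ [y]) r).Perm
        (crossL inst acc (y :: r) ++ pairsF inst (y :: r)) := by
      refine ((ih (acc ++ [y])).append_left _).trans ?_
      rw [h2, h3]
      refine List.Perm.trans ?_ ((h6.symm).append_right _)
      rw [show pairsF inst (y :: r)
          = (r.filter (fun z => y.2 == z.2)).map (fun z => dvv inst y.1 z.1) ++ pairsF inst r
        from rfl]
      simp only [List.append_assoc]
      exact List.Perm.refl _
    simpa [pairsB] using key

theorem pairs_perm (inst : List (String × List (List Int))) (sol : List (Int × Int)) :
    (pairsB inst [] sol).Perm (pairsF inst sol) := by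
  have h := pairsB_perm inst sol []
  simpa [crossL] using h

-- ===== VERDICT (by name: the statement is the Claim_ definition above) =====
theorem evalSolution_spec : Claim_equal_evalSolution := by
  intro inst sol _ _
  unfold Spec_evalSolution
  rw [A_eq, B_eq]
  exact (@List.Perm.foldl_eq _ _ min _ _ ⟨fun b a₁ a₂ => by omega⟩ (pairs_perm inst sol) _).symm
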